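-- pv_equiv track=rewrite | github.com/VenkataSwathi-M/LeetCode-Solutions | Shuffle-String.py | restoreString
-- ===== SOURCE A (Python) =====
-- def restoreString(s, indices):
--     """
--     :type s: str
--     :type indices: List[int]
--     :rtype: str
--     """
--     dic = {}
--
--     for i,j in zip(s,indices):
--         dic[j] = i
--     z = 0
--     s = ""
--     while z < len(dic):
--         s = s + dic[z]
--         z += 1
--     return s
-- ===== SOURCE B (Python) =====
-- def restoreString(s, indices):
--     pairs = sorted(zip(indices, s), key=lambda p: p[0])
--     return ''.join(c for _, c in pairs)
-- ===== Notes on version B (the rewrite author's own statement) =====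
-- stated objective: idiomatic
-- what changed: B sorts the zipped (index, char) pairs by index with a comparison sort and joins the characters in sorted order, replacing A's hash-table build followed by a position-by-position lookup scan over 0..n-1.
-- outside the precondition, e.g. on restoreString('ab', [0, 0]): A returns 'b', B returns 'ab'; on restoreString('a', [5]): A raises KeyError, B returns 'a'
import Mathlib
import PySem

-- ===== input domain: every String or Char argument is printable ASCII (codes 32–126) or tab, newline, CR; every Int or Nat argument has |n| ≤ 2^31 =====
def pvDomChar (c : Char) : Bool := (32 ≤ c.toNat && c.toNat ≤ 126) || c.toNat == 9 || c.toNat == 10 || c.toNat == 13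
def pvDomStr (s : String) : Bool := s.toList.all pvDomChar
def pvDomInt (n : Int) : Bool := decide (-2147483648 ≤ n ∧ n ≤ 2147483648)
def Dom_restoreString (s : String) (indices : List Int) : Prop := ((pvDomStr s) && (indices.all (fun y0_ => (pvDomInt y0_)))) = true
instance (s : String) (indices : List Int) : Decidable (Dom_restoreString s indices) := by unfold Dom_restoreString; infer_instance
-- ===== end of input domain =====

-- B sorts the (index, char) pairs by index and emits the characters in sorted order, instead of A's dict build plus position-by-position lookup scan (idiomatic; same result under the permutation precondition).


-- ===== PORT A =====
-- dic = {}; for i, j in zip(s, indices): dic[j] = i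
def aDict (s : String) (indices : List Int) : PySem.Dict Int Char :=
  (s.toList.zip indices).foldl (fun d p => d.insert p.2 p.1) PySem.Dict.empty

-- z = 0; while z < len(dic): s = s + dic[z]; z += 1   (dic[z] raising KeyError is the `none` branch, excluded by Pre_)
def aLoop (dic : PySem.Dict Int Char) (z : Nat) (acc : List Char) : List Char :=
  if _h : z < dic.size then
    match dic.get? (z : Int) with
    | some c => aLoop dic (z + 1) (acc ++ [c])
    | none => acc
  else acc
termination_by dic.size - z

def restoreString (s : String) (indices : List Int) : String :=
  String.ofList (aLoop (aDict s indices) 0 [])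

-- ===== PORT B =====
-- pairs = sorted(zip(indices, s), key=lambda p: p[0]); ''.join(c for _, c in pairs)
def restoreString_alt (s : String) (indices : List Int) : String :=
  String.ofList ((PySem.List.sorted (indices.zip s.toList) (fun p => p.1) false).map (fun p => p.2))

-- ===== PRECONDITION & SPEC =====
-- Pre_ excludes inputs whose first m = min(len(s), len(indices)) indices are not a permutation of range(m)
-- (duplicates, gaps, negatives): on gaps A raises KeyError, and on duplicate indices A's returned value is an
-- accident of last-wins dict overwriting while B's (all characters, in stable sorted order) is equally defensible
-- — an unspecified corner (e.g. A('ab',[0,0]) = 'b', B('ab',[0,0]) = 'ab').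
def Pre_restoreString (s : String) (indices : List Int) : Prop :=
  (indices.take (min s.toList.length indices.length)).Perm
    ((List.range (min s.toList.length indices.length)).map (fun k : Nat => (k : Int)))
instance (s : String) (indices : List Int) : Decidable (Pre_restoreString s indices) := by
  unfold Pre_restoreString; infer_instance

def pvWitness_restoreString : String × List Int := ("abc", [1, 0, 2])

def Spec_restoreString (s : String) (indices : List Int) (out : String) : Prop := out = restoreString_alt s indices
instance (s : String) (indices : List Int) (out : String) : Decidable (Spec_restoreString s indices out) := by unfold Spec_restoreString; infer_instance

-- ===== CLAIM (what is proved, stated in full; the proofs are below) =====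
def Claim_equal_restoreString : Prop := ∀ (s : String) (indices : List Int), Dom_restoreString s indices → Pre_restoreString s indices → Spec_restoreString s indices (restoreString s indices)

-- ===== LEMMAS AND PROOFS =====

-- the character A's dict holds at position k (proof-side abbreviation)
def gkey (s : String) (indices : List Int) (k : Nat) : Char := (aDict s indices).getD (k : Int) 'a'

-- A's while loop emits dic[z], dic[z+1], …, dic[n-1] when every position below n is present
lemma aLoop_spec (dic : PySem.Dict Int Char) (g : Nat → Char) (n : Nat) (hsize : dic.size = n)
    (hget : ∀ z : Nat, z < n → dic.get? (z : Int) = some (g z)) :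
    ∀ m z acc, z + m = n → aLoop dic z acc = acc ++ (List.range' z m).map g := by
  intro m
  induction m with
  | zero =>
    intro z acc hz
    rw [aLoop, dif_neg (show ¬ z < dic.size by rw [hsize]; omega)]
    simp
  | succ m ih =>
    intro z acc hz
    rw [aLoop, dif_pos (show z < dic.size by rw [hsize]; omega), hget z (by omega)]
    show aLoop dic (z + 1) (acc ++ [g z]) = _
    rw [ih (z + 1) (acc ++ [g z]) (by omega), List.range'_succ]
    simp

-- ===== VERDICT (by name: the statement is the Claim_ definition above) =====
theorem restoreString_spec : Claim_equal_restoreString := by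
  intro s indices _ hperm
  unfold Spec_restoreString restoreString restoreString_alt
  set cs := s.toList with hcs
  set n := min cs.length indices.length with hn
  unfold Pre_restoreString at hperm
  rw [← hcs, ← hn] at hperm
  -- Nodup facts from the permutation hypothesis
  have hR : ((List.range n).map (fun k : Nat => (k : Int))).Nodup :=
    List.Nodup.map (fun a b h => by exact_mod_cast h) List.nodup_range
  have hndtake : (indices.take n).Nodup := (hperm.nodup_iff).mpr hR
  -- the keys inserted by A's loop, in order
  have hsnd : (cs.zip indices).map (fun p => p.2) = indices.take n := by
    apply List.ext_getElem (by simp; omega)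
    intro i h1 h2
    simp
  have hndsnd : ((cs.zip indices).map (fun p => p.2)).Nodup := by rw [hsnd]; exact hndtake
  -- the dict's items are exactly the (index, char) pairs of the truncated zip
  have hitems : (aDict s indices).items = indices.zip cs := by
    show ((cs.zip indices).foldl (fun d p => d.insert p.2 p.1) PySem.Dict.empty).items = _
    rw [PySem.Dict.items_foldl_insert_fresh _ _ _ _
      (by intro a _; exact PySem.Dict.contains_empty _) hndsnd]
    rw [show (fun a : Char × Int => (a.2, a.1)) = (Prod.swap : Char × Int → Int × Char) from rfl,
      List.zip_swap]
    rfl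
  have hkeysnd : (aDict s indices).keys.Nodup := by
    show ((aDict s indices).items.map (fun p => p.1)).Nodup
    rw [hitems]
    have : (indices.zip cs).map (fun p => p.1) = indices.take n := by
      apply List.ext_getElem (by simp; omega)
      intro i h1 h2
      simp
    rw [this]; exact hndtake
  have hlen : (aDict s indices).size = n := by
    show (aDict s indices).items.length = n
    rw [hitems]; simp [hn]; omega
  -- every pair of the zip is (index, char held by A's dict at that index)
  have hzs' : indices.zip cs = (indices.take n).map (fun k => (k, (aDict s indices).getD k 'a')) := by
    apply List.ext_getElem (by simp; omega)
    intro i h1 h2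
    have hlt1 : i < indices.length := by simp at h1; omega
    have hlt2 : i < cs.length := by simp at h1; omega
    have hp : (indices.zip cs)[i] = (indices[i], cs[i]) := by simp
    have hm : (indices[i], cs[i]) ∈ (aDict s indices).items := by
      rw [hitems, ← hp]; exact List.getElem_mem h1
    have hg : (aDict s indices).getD (indices[i]) 'a' = cs[i] :=
      PySem.Dict.getD_of_mem_items _ hm hkeysnd 'a'
    rw [hp]
    simp [hg]
  -- the canonical strictly key-increasing arrangement of the pairs
  have hperm' : ((List.range n).map (fun k : Nat => ((k : Int), gkey s indices k))).Perm
      (indices.zip cs) := by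
    have h1 := (hperm.map (fun k => (k, (aDict s indices).getD k 'a'))).symm
    rw [← hzs'] at h1
    rw [List.map_map] at h1
    simpa [Function.comp, gkey] using h1
  -- A's loop sees every position 0..n-1
  have hget : ∀ z : Nat, z < n → (aDict s indices).get? (z : Int) = some (gkey s indices z) := by
    intro z hz
    have hmemL : ((z : Int), gkey s indices z)
        ∈ (List.range n).map (fun k : Nat => ((k : Int), gkey s indices k)) :=
      List.mem_map.mpr ⟨z, List.mem_range.mpr hz, rfl⟩
    have hmi : ((z : Int), gkey s indices z) ∈ (aDict s indices).items := by
      rw [hitems]; exact (hperm'.mem_iff).mp hmemL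
    exact PySem.Dict.get?_of_mem_items _ hmi hkeysnd
  have hA := aLoop_spec (aDict s indices) (gkey s indices) n hlen hget n 0 [] (by omega)
  -- B's sort: the canonical arrangement IS the sorted order (strictly increasing keys)
  have hsorted : PySem.List.sorted (indices.zip cs) (fun p => p.1) false
      = (List.range n).map (fun k : Nat => ((k : Int), gkey s indices k)) := by
    have hpw : ((List.range n).map (fun k : Nat => ((k : Int), gkey s indices k))).Pairwise
        (fun a b => a.1 < b.1) := by
      rw [List.pairwise_map]
      exact List.pairwise_lt_range.imp (by intro a b h; show (a : Int) < (b : Int); exact_mod_cast h)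
    exact PySem.List.sorted_eq_of_perm_of_pairwise_lt _ _ _ hperm' hpw
  rw [hA, hsorted, List.map_map]
  rw [← List.range_eq_range']
  rfl
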